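-- pv_equiv track=rewrite | github.com/yeardream-high6/coding_test | 곽치영/프로그래머스/07 동적계획법/01 N으로 표현/programmers42895.py | solution
-- ===== SOURCE A (Python) =====
-- from itertools import product
--
-- def solution(N, number):
--     MAX = 8
--     dp = [set() for _ in range(MAX+1)]
--     for i in range(1, MAX+1):
--         dp[i].add(int(str(N) * i))
--         for j in range(1, i):
--             if j <= i-j:
--                 dp[i].update(a + b for a, b in product(dp[j], dp[i-j]))
--                 dp[i].update(a * b for a, b in product(dp[j], dp[i-j]))
--             dp[i].update(a - b for a, b in product(dp[j], dp[i-j]))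
--             dp[i].update(a // b for a, b in product(dp[j], dp[i-j]) if b != 0)
--     for i in range(1,MAX+1):
--         if number in dp[i]:
--             break
--     else:
--         return -1
--     return i
-- ===== SOURCE B (Python) =====
-- from functools import lru_cache
--
-- def solution(N, number):
--     @lru_cache(maxsize=None)
--     def build(i):
--         # values reachable with exactly i copies of N
--         vals = {int(str(N) * i)}
--         for j in range(1, i):
--             for a in build(j):
--                 for b in build(i - j):
--                     vals.add(a + b)
--                     vals.add(a - b)
--                     vals.add(a * b)
--                     if b != 0:
--                         vals.add(a // b)
--         return frozenset(vals)
--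
--     for i in range(1, 9):
--         if number in build(i):
--             return i
--     return -1
-- ===== Notes on version B (the rewrite author's own statement) =====
-- stated objective: alternative
-- what changed: Replaces A's bottom-up 9-entry dp table (with a j<=i-j guard on sums/products) by a top-down memoized recursion build(i) over the same arithmetic closure, adding all four operations for every split and scanning i=1..8 with an early return at the first hit.
import Mathlib
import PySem

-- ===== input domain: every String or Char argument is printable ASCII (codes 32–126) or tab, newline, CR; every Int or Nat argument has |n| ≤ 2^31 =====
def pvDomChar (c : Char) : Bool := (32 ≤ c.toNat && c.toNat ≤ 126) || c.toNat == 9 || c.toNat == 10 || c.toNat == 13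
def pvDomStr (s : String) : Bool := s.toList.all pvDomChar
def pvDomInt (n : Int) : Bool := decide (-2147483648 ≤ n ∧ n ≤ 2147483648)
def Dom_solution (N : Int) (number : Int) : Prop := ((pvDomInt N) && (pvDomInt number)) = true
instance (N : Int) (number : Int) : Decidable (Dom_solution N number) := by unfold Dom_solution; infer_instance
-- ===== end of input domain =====

-- B replaces A's bottom-up 9-entry dp table by a top-down recursion build(i) over the same
-- arithmetic closure, scanning i = 1..8 and stopping at the first hit (objective: alternative).
-- The dp sets are INTERNAL, order-independently consumed state (membership tests and building
-- further sets only); Python's hash sets are modelled by Std.HashSet Int, which is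
-- membership-exact for that use (a list-based set model makes every insert a linear scan and
-- the ports unevaluable on the sampled inputs).

-- ===== PORT A =====
-- int(str(N) * i); total form via getD 0 — Pre_solution (0 ≤ N) guarantees ofChars? returns some
def rep (N : Int) (i : Nat) : Int :=
  (PySem.Int.ofChars? ((List.replicate i (PySem.Int.toChars N)).flatten)).getD 0

-- the body of A's inner 'for j in range(1, i)' loop (sj = dp[j], sk = dp[i-j], s = dp[i] so far);
-- each dp[i].update(gen) is the fold of insert over the generated values
def bodyA (i j : Nat) (sj sk s : Std.HashSet Int) : Std.HashSet Int :=
  let s := if j ≤ i - j then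
      ((sj.toList.flatMap (fun a => sk.toList.map (fun b => a * b))).foldl .insert
        ((sj.toList.flatMap (fun a => sk.toList.map (fun b => a + b))).foldl .insert s))
    else s
  let s := (sj.toList.flatMap (fun a => sk.toList.map (fun b => a - b))).foldl .insert s
  (sj.toList.flatMap (fun a =>
    (sk.toList.filter (fun b => decide (b ≠ 0))).map (fun b => PySem.Int.floordiv a b))).foldl
    .insert s

-- one iteration of A's outer 'for i in range(1, MAX+1)' loop
def stepA (N : Int) (dp : List (Std.HashSet Int)) (i : Nat) : List (Std.HashSet Int) :=
  dp.set i ((List.range' 1 (i - 1)).foldl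
    (fun s j => bodyA i j (dp.getD j ∅) (dp.getD (i - j) ∅) s)
    ((dp.getD i ∅).insert (rep N i)))

def solution (N : Int) (number : Int) : Int :=
  -- MAX = 8; ranges are over small positive ints, so range(1, MAX+1) / range(1, i) are
  -- transcribed exactly as List.range' 1 8 / List.range' 1 (i - 1)
  let dp := (List.range' 1 8).foldl (stepA N) (List.replicate 9 (∅ : Std.HashSet Int))
  match (List.range' 1 8).find? (fun i => (dp.getD i ∅).contains number) with
  | some i => (i : Int)
  | none => -1

-- ===== PORT B =====
-- the body of Source B's innermost 'for b in build(i - j)' loop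
def bodyB (a b : Int) (vals : Std.HashSet Int) : Std.HashSet Int :=
  let vals := vals.insert (a + b)
  let vals := vals.insert (a - b)
  let vals := vals.insert (a * b)
  if b ≠ 0 then vals.insert (PySem.Int.floordiv a b) else vals

-- build(i) = set of values reachable with exactly i copies of N (Source B's recursion)
def build (N : Int) (i : Nat) : Std.HashSet Int :=
  (List.range' 1 (i - 1)).attach.foldl (fun vals jh =>
      (build N jh.1).toList.foldl (fun vals a =>
        (build N (i - jh.1)).toList.foldl (fun vals b => bodyB a b vals) vals) vals)
    ((∅ : Std.HashSet Int).insert (rep N i))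
  termination_by i
  decreasing_by
  · have := jh.2; rw [List.mem_range'_1] at this; omega
  · have := jh.2; rw [List.mem_range'_1] at this; omega

def solution_alt (N : Int) (number : Int) : Int :=
  match (List.range' 1 8).find? (fun i => (build N i).contains number) with
  | some i => (i : Int)
  | none => -1

-- ===== PRECONDITION & SPEC =====
-- A raises ValueError for N < 0 (int(str(N)*i) fails for every i ≥ 2); those inputs are excluded.
def Pre_solution (N : Int) (number : Int) : Prop := 0 ≤ N
instance (N : Int) (number : Int) : Decidable (Pre_solution N number) := by
  unfold Pre_solution; infer_instance
def pvWitness_solution : Int × Int := (5, 12)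

def Spec_solution (N : Int) (number : Int) (out : Int) : Prop := out = solution_alt N number
instance (N : Int) (number : Int) (out : Int) : Decidable (Spec_solution N number out) := by
  unfold Spec_solution; infer_instance

-- ===== CLAIM (what is proved, stated in full; the proofs are below) =====
def Claim_equal_solution : Prop := ∀ (N : Int) (number : Int), Dom_solution N number → Pre_solution N number → Spec_solution N number (solution N number)

-- ===== LEMMAS AND PROOFS =====

-- what one pass of A's inner loop body contributes (guarded sums/products, differences, quotients)
def QA (i j : Nat) (S T : Std.HashSet Int) (x : Int) : Prop :=
  (j ≤ i - j ∧ ((∃ a ∈ S, ∃ b ∈ T, a + b = x) ∨ (∃ a ∈ S, ∃ b ∈ T, a * b = x))) ∨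
  (∃ a ∈ S, ∃ b ∈ T, a - b = x) ∨
  (∃ a ∈ S, ∃ b ∈ T, b ≠ 0 ∧ PySem.Int.floordiv a b = x)

-- what one pass of B's inner double loop contributes
def QB (S T : Std.HashSet Int) (x : Int) : Prop :=
  ∃ a ∈ S, ∃ b ∈ T, a + b = x ∨ a - b = x ∨ a * b = x ∨ (b ≠ 0 ∧ PySem.Int.floordiv a b = x)

-- membership through a fold whose step only adds elements described by Q
lemma pv_mem_foldl {β : Type} (f : Std.HashSet Int → β → Std.HashSet Int) (Q : β → Int → Prop)
    (hf : ∀ s b x, x ∈ f s b ↔ x ∈ s ∨ Q b x) :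
    ∀ (l : List β) (s : Std.HashSet Int) (x : Int),
      x ∈ l.foldl f s ↔ x ∈ s ∨ ∃ b ∈ l, Q b x := by
  intro l
  induction l with
  | nil => simp
  | cons b t ih =>
    intro s x
    simp only [List.foldl_cons, ih, hf, List.mem_cons]
    constructor
    · rintro ((h | h) | ⟨c, hc, hq⟩)
      · exact Or.inl h
      · exact Or.inr ⟨b, Or.inl rfl, h⟩
      · exact Or.inr ⟨c, Or.inr hc, hq⟩
    · rintro (h | ⟨c, (rfl | hc), hq⟩)
      · exact Or.inl (Or.inl h)
      · exact Or.inl (Or.inr hq)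
      · exact Or.inr ⟨c, hc, hq⟩

lemma pv_mem_foldl_insert (l : List Int) (s : Std.HashSet Int) (x : Int) :
    x ∈ l.foldl .insert s ↔ x ∈ s ∨ x ∈ l := by
  rw [pv_mem_foldl _ (fun v x => v = x)
    (by intro s v x; rw [Std.HashSet.mem_insert]; simp only [beq_iff_eq]; tauto)]
  simp

lemma mem_bodyB (a b : Int) (vals : Std.HashSet Int) (x : Int) :
    x ∈ bodyB a b vals ↔ x ∈ vals ∨
      (a + b = x ∨ a - b = x ∨ a * b = x ∨ (b ≠ 0 ∧ PySem.Int.floordiv a b = x)) := by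
  unfold bodyB
  split_ifs with h <;> simp only [Std.HashSet.mem_insert, beq_iff_eq, h] <;> tauto

lemma mem_bodyA (i j : Nat) (sj sk s : Std.HashSet Int) (x : Int) :
    x ∈ bodyA i j sj sk s ↔ x ∈ s ∨ QA i j sj sk x := by
  unfold bodyA QA
  split_ifs with h <;>
    simp only [pv_mem_foldl_insert, List.mem_flatMap, List.mem_map, List.mem_filter,
      Std.HashSet.mem_toList, h, decide_eq_true_eq] <;> aesop

lemma mem_build (N : Int) (i : Nat) (x : Int) :
    x ∈ build N i ↔ rep N i = x ∨
      ∃ j ∈ List.range' 1 (i - 1), QB (build N j) (build N (i - j)) x := by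
  rw [build]
  rw [pv_mem_foldl _ (fun jh x => QB (build N jh.1) (build N (i - jh.1)) x)]
  · rw [Std.HashSet.mem_insert]
    simp [Std.HashSet.not_mem_empty]
  · intro s jh x
    rw [pv_mem_foldl _ (fun a x => ∃ b ∈ (build N (i - jh.1)),
          a + b = x ∨ a - b = x ∨ a * b = x ∨ (b ≠ 0 ∧ PySem.Int.floordiv a b = x))]
    · unfold QB
      simp [Std.HashSet.mem_toList]
    · intro s a x
      rw [pv_mem_foldl _ (fun b x =>
            a + b = x ∨ a - b = x ∨ a * b = x ∨ (b ≠ 0 ∧ PySem.Int.floordiv a b = x))]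
      · simp [Std.HashSet.mem_toList]
      · intro s b x
        exact mem_bodyB a b s x

-- the per-entry recursion A's table realises (same body as stepA, reading earlier entries)
def specA (N : Int) (i : Nat) : Std.HashSet Int :=
  (List.range' 1 (i - 1)).attach.foldl
    (fun s jh => bodyA i jh.1 (specA N jh.1) (specA N (i - jh.1)) s)
    ((∅ : Std.HashSet Int).insert (rep N i))
  termination_by i
  decreasing_by
  · have := jh.2; rw [List.mem_range'_1] at this; omega
  · have := jh.2; rw [List.mem_range'_1] at this; omega

lemma mem_specA (N : Int) (i : Nat) (x : Int) :
    x ∈ specA N i ↔ rep N i = x ∨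
      ∃ j ∈ List.range' 1 (i - 1), QA i j (specA N j) (specA N (i - j)) x := by
  rw [specA]
  rw [pv_mem_foldl _ (fun jh x => QA i jh.1 (specA N jh.1) (specA N (i - jh.1)) x)]
  · rw [Std.HashSet.mem_insert]
    simp [Std.HashSet.not_mem_empty]
  · intro s jh x
    exact mem_bodyA i jh.1 _ _ s x

-- the heart of the equivalence: A's guarded sums/products are recovered from the
-- symmetric split j ↔ i-j by commutativity of + and *
lemma specA_mem_eq (N : Int) : ∀ i x, (x ∈ specA N i ↔ x ∈ build N i) := by
  intro i
  induction i using Nat.strong_induction_on with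
  | _ i ih =>
  intro x
  rw [mem_specA, mem_build]
  apply or_congr Iff.rfl
  constructor
  · rintro ⟨j, hj, hq⟩
    have hjb := List.mem_range'_1.mp hj
    have hj1 : j < i := by omega
    have hj2 : i - j < i := by omega
    refine ⟨j, hj, ?_⟩
    unfold QA at hq
    rcases hq with ⟨_, ⟨a, ha, b, hb, h⟩ | ⟨a, ha, b, hb, h⟩⟩ | ⟨a, ha, b, hb, h⟩
      | ⟨a, ha, b, hb, hdz, h⟩
    · exact ⟨a, (ih j hj1 a).mp ha, b, (ih (i - j) hj2 b).mp hb, Or.inl h⟩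
    · exact ⟨a, (ih j hj1 a).mp ha, b, (ih (i - j) hj2 b).mp hb, Or.inr (Or.inr (Or.inl h))⟩
    · exact ⟨a, (ih j hj1 a).mp ha, b, (ih (i - j) hj2 b).mp hb, Or.inr (Or.inl h)⟩
    · exact ⟨a, (ih j hj1 a).mp ha, b, (ih (i - j) hj2 b).mp hb,
        Or.inr (Or.inr (Or.inr ⟨hdz, h⟩))⟩
  · rintro ⟨j, hj, a, ha, b, hb, hx⟩
    have hjb := List.mem_range'_1.mp hj
    have hj1 : j < i := by omega
    have hj2 : i - j < i := by omega
    have ha' := (ih j hj1 a).mpr ha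
    have hb' := (ih (i - j) hj2 b).mpr hb
    have hswap : i - (i - j) = j := by omega
    rcases hx with h | h | h | ⟨hdz, h⟩
    · by_cases hle : j ≤ i - j
      · exact ⟨j, hj, Or.inl ⟨hle, Or.inl ⟨a, ha', b, hb', h⟩⟩⟩
      · refine ⟨i - j, List.mem_range'_1.mpr ⟨by omega, by omega⟩,
          Or.inl ⟨by omega, Or.inl ⟨b, hb', a, ?_, by omega⟩⟩⟩
        rw [hswap]; exact ha'
    · exact ⟨j, hj, Or.inr (Or.inl ⟨a, ha', b, hb', h⟩)⟩
    · by_cases hle : j ≤ i - j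
      · exact ⟨j, hj, Or.inl ⟨hle, Or.inr ⟨a, ha', b, hb', h⟩⟩⟩
      · refine ⟨i - j, List.mem_range'_1.mpr ⟨by omega, by omega⟩,
          Or.inl ⟨by omega, Or.inr ⟨b, hb', a, ?_, (Int.mul_comm b a).trans h⟩⟩⟩
        rw [hswap]; exact ha'
    · exact ⟨j, hj, Or.inr (Or.inr ⟨a, ha', b, hb', hdz, h⟩)⟩

lemma dp_length (N : Int) (k : Nat) :
    ((List.range' 1 k).foldl (stepA N) (List.replicate 9 (∅ : Std.HashSet Int))).length = 9 := by
  induction k with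
  | zero => simp
  | succ k ih =>
    rw [List.range'_1_concat, List.foldl_append, List.foldl_cons, List.foldl_nil, stepA,
      List.length_set]
    exact ih

-- drop an attach from a fold once the step only uses the value
lemma pv_foldl_attach {α β : Type} (l : List α) (g : β → {x // x ∈ l} → β) (f : β → α → β)
    (b : β) (h : ∀ s a, g s a = f s a.1) : l.attach.foldl g b = l.foldl f b := by
  have hg : g = fun s a => f s a.1 := by funext s a; exact h s a
  rw [hg, List.foldl_attach]

lemma dp_getD (N : Int) : ∀ k, k ≤ 8 → ∀ j,
    ((List.range' 1 k).foldl (stepA N) (List.replicate 9 (∅ : Std.HashSet Int))).getD j ∅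
      = if 1 ≤ j ∧ j ≤ k then specA N j else ∅ := by
  intro k
  induction k with
  | zero =>
    intro _ j
    rw [if_neg (by omega), List.range'_zero, List.foldl_nil, List.getD_eq_getElem?_getD,
      List.getElem?_replicate]
    split <;> rfl
  | succ k ih =>
    intro hk j
    rw [List.range'_1_concat, List.foldl_append, List.foldl_cons, List.foldl_nil]
    have hlen := dp_length N k
    have hgd := ih (by omega)
    -- the freshly computed entry is exactly specA N (1+k)
    have hs : (List.range' 1 ((1 + k) - 1)).foldl
        (fun s j => bodyA (1 + k) j
          (((List.range' 1 k).foldl (stepA N) (List.replicate 9 (∅ : Std.HashSet Int))).getD j ∅)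
          (((List.range' 1 k).foldl (stepA N) (List.replicate 9 (∅ : Std.HashSet Int))).getD ((1 + k) - j) ∅) s)
        ((((List.range' 1 k).foldl (stepA N) (List.replicate 9 (∅ : Std.HashSet Int))).getD (1 + k) ∅).insert
          (rep N (1 + k)))
        = specA N (1 + k) := by
      rw [specA]
      rw [pv_foldl_attach _ _
        (fun s j => bodyA (1 + k) j (specA N j) (specA N ((1 + k) - j)) s) _ (fun s a => rfl)]
      rw [hgd (1 + k), if_neg (by omega)]
      apply PySem.List.foldl_congr_mem
      intro s j hjm
      have hjb := List.mem_range'_1.mp (by simpa using hjm)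
      rw [hgd j, if_pos (by omega), hgd ((1 + k) - j), if_pos (by omega)]
    rw [stepA, hs]
    by_cases hj : j = 1 + k
    · subst hj
      rw [List.getD_eq_getElem?_getD, List.getElem?_set_self (by omega), if_pos (by omega)]
      rfl
    · rw [List.getD_eq_getElem?_getD, List.getElem?_set_ne (by omega),
        ← List.getD_eq_getElem?_getD, hgd j]
      by_cases h1 : 1 ≤ j ∧ j ≤ k
      · rw [if_pos h1, if_pos (by omega)]
      · rw [if_neg h1, if_neg (by omega)]

lemma pv_find?_congr {α : Type} (l : List α) (p q : α → Bool) (h : ∀ a ∈ l, p a = q a) :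
    l.find? p = l.find? q := by
  induction l with
  | nil => rfl
  | cons a t ih =>
    simp only [List.find?, h a (by simp)]
    split
    · rfl
    · exact ih (fun b hb => h b (by simp [hb]))

-- ===== VERDICT (by name: the statement is the Claim_ definition above) =====
theorem solution_spec : Claim_equal_solution := by
  intro N number _ _
  unfold Spec_solution solution solution_alt
  show (match (List.range' 1 8).find? (fun i =>
      (((List.range' 1 8).foldl (stepA N) (List.replicate 9 (∅ : Std.HashSet Int))).getD i ∅).contains
      number) with
    | some i => (i : Int)
    | none => -1) =
    (match (List.range' 1 8).find? (fun i => (build N i).contains number) with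
    | some i => (i : Int)
    | none => -1)
  have hpred : ∀ i ∈ List.range' 1 8,
      ((((List.range' 1 8).foldl (stepA N) (List.replicate 9 (∅ : Std.HashSet Int))).getD i ∅).contains number)
      = (build N i).contains number := by
    intro i hi
    have hib := List.mem_range'_1.mp hi
    rw [dp_getD N 8 (by omega) i, if_pos (by omega)]
    apply Bool.coe_iff_coe.mp
    rw [Std.HashSet.contains_iff_mem, Std.HashSet.contains_iff_mem]
    exact specA_mem_eq N i number
  rw [pv_find?_congr _ _ _ hpred]
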